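-- pv_equiv track=rewrite | github.com/Tmmn/advent-of-code | 2025/03/03.py | get_largest_subsequence
-- ===== SOURCE A (Python) =====
-- def get_largest_subsequence(seq, l):
--     stack = []
--     n = len(seq)
--
--     for i, char in enumerate(seq):
--         remaining_in_str = n - i
--         # remove number if the current number is bigger than the last and there are enough numbers coming
--         while stack and stack[-1] < char and (len(stack) + remaining_in_str) > l:
--             stack.pop()
--         # add the number if there is still room
--         if len(stack) < l:
--             stack.append(char)
--     return "".join(stack)
-- ===== SOURCE B (Python) =====
-- def get_largest_subsequence(seq, l):
--     n = len(seq)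
--     k = max(0, min(l, n))
--     out = []
--     s = seq
--     while k > 0:
--         w = s[:len(s) - k + 1]
--         j = 0
--         for i in range(1, len(w)):
--             if w[j] < w[i]:
--                 j = i
--         out.append(s[j])
--         s = s[j + 1:]
--         k -= 1
--     return "".join(out)
-- ===== Notes on version B (the rewrite author's own statement) =====
-- stated objective: alternative
-- what changed: Replaces A's monotonic stack (pop smaller elements while enough characters remain) by direct greedy selection: for each of the k=min(l,n) output slots, scan the shrinking admissible window for the leftmost maximum character and recurse on the suffix after it.
import Mathlib
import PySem

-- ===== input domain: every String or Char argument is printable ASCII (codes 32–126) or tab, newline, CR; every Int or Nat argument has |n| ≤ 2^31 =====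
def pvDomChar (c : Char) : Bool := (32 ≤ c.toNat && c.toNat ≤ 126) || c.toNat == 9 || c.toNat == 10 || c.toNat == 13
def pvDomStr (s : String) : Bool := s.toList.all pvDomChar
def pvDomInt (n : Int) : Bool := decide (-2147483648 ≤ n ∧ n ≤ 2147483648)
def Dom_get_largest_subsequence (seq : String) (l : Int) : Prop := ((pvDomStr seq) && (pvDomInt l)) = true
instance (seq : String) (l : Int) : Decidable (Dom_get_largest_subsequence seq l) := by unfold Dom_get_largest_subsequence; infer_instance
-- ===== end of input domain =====

-- B replaces A's monotonic stack by direct greedy selection: for each output slot it scans the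
-- shrinking admissible window for the leftmost maximum character (objective: alternative algorithm).

-- ===== PORT A =====
-- Python's stack is modelled head-as-top (reversed); the final join reverses it back.
-- the while loop: pop while stack nonempty, top < char, and len(stack) + (n - i) > l
def aPop (l n i : Int) (c : Char) : List Char → List Char
  | [] => []
  | t :: s => if t < c ∧ ((s.length : Int) + 1 + (n - i) > l) then aPop l n i c s else t :: s

-- the for loop over enumerate(seq)
def aLoop (l n : Int) : List Char → Int → List Char → List Char
  | [], _, stack => stack
  | c :: rest, i, stack =>
      let st := aPop l n i c stack
      aLoop l n rest (i + 1) (if (st.length : Int) < l then c :: st else st)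

def get_largest_subsequence (seq : String) (l : Int) : String :=
  String.mk ((aLoop l (seq.toList.length : Int) seq.toList 0 []).reverse)

-- ===== PORT B =====
-- inner for loop of Source B: leftmost index of the maximum character (amGo rest i best j)
def amGo : List Char → Nat → Char → Nat → Nat
  | [], _, _, j => j
  | c :: rest, i, best, j => if best < c then amGo rest (i + 1) c i else amGo rest (i + 1) best j

def argmax : List Char → Nat
  | [] => 0
  | c :: rest => amGo rest 1 c 0

-- the while k > 0 loop of Source B: pick leftmost max of the window, continue on the suffix
def bPick : List Char → Nat → List Char
  | _, 0 => []
  | s, k + 1 =>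
      let w := s.take (s.length - (k + 1) + 1)
      let j := argmax w
      s.getD j default :: bPick (s.drop (j + 1)) k

def get_largest_subsequence_alt (seq : String) (l : Int) : String :=
  let s := seq.toList
  String.mk (bPick s (min l (s.length : Int)).toNat)

-- ===== PRECONDITION & SPEC =====
def Spec_get_largest_subsequence (seq : String) (l : Int) (out : String) : Prop := out = get_largest_subsequence_alt seq l
instance (seq : String) (l : Int) (out : String) : Decidable (Spec_get_largest_subsequence seq l out) := by unfold Spec_get_largest_subsequence; infer_instance

-- ===== CLAIM (what is proved, stated in full; the proofs are below) =====
def Claim_equal_get_largest_subsequence : Prop := ∀ (seq : String) (l : Int), Dom_get_largest_subsequence seq l → Spec_get_largest_subsequence seq l (get_largest_subsequence seq l)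

-- ===== LEMMAS AND PROOFS =====

-- `r` is the leftmost index of the maximum of `w`
def ArgmaxGood (w : List Char) (r : Nat) : Prop :=
  r < w.length ∧ (∀ t, t < r → w.getD t default < w.getD r default) ∧
    (∀ t, t < w.length → w.getD t default ≤ w.getD r default)

lemma getD_take (s : List Char) (a t : Nat) (h : t < (s.take a).length) :
    (s.take a).getD t default = s.getD t default := by
  have h1 : t < s.length := lt_of_lt_of_le h (by simp [List.length_take])
  rw [List.getD_eq_getElem _ _ h, List.getD_eq_getElem _ _ h1, List.getElem_take]

lemma getD_drop (s : List Char) (a t : Nat) (h : t < (s.drop a).length) :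
    (s.drop a).getD t default = s.getD (a + t) default := by
  have h1 : a + t < s.length := by simp [List.length_drop] at h ⊢; omega
  rw [List.getD_eq_getElem _ _ h, List.getD_eq_getElem _ _ h1, List.getElem_drop]

lemma amGo_inv : ∀ (fuel : Nat) (w : List Char) (i j : Nat),
    w.length - i ≤ fuel → j < i → i ≤ w.length →
    (∀ t, t < j → w.getD t default < w.getD j default) →
    (∀ t, j ≤ t → t < i → w.getD t default ≤ w.getD j default) →
    ArgmaxGood w (amGo (w.drop i) i (w.getD j default) j) := by
  intro fuel
  induction fuel with
  | zero =>
      intro w i j hfuel hji hi h1 h2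
      have hie : i = w.length := by omega
      subst hie
      rw [List.drop_length]
      simp only [amGo]
      refine ⟨hji, h1, fun t ht => ?_⟩
      rcases Nat.lt_or_ge t j with h | h
      · exact le_of_lt (h1 t h)
      · exact h2 t h ht
  | succ f ih =>
      intro w i j hfuel hji hi h1 h2
      by_cases hlt : i < w.length
      · rw [List.drop_eq_getElem_cons hlt]
        have hgd : w[i] = w.getD i default := (List.getD_eq_getElem w default hlt).symm
        rw [amGo, hgd]
        by_cases hc : w.getD j default < w.getD i default
        · rw [if_pos hc]
          exact ih w (i + 1) i (by omega) (by omega) (by omega)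
            (fun t ht => by
              by_cases htj : t < j
              · exact (h1 t htj).trans hc
              · exact lt_of_le_of_lt (h2 t (by omega) ht) hc)
            (fun t ht1 ht2 => by rw [show t = i by omega])
        · rw [if_neg hc]
          exact ih w (i + 1) j (by omega) (by omega) (by omega) h1
            (fun t ht1 ht2 => by
              by_cases hti : t < i
              · exact h2 t ht1 hti
              · rw [show t = i by omega]; exact le_of_not_gt hc)
      · have hie : i = w.length := by omega
        subst hie
        rw [List.drop_length]
        simp only [amGo]
        refine ⟨hji, h1, fun t ht => ?_⟩
        rcases Nat.lt_or_ge t j with h | h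
        · exact le_of_lt (h1 t h)
        · exact h2 t h ht

lemma argmax_good (w : List Char) (hw : w ≠ []) : ArgmaxGood w (argmax w) := by
  obtain ⟨c, rest, rfl⟩ : ∃ c rest, w = c :: rest := by
    cases w with | nil => exact absurd rfl hw | cons c rest => exact ⟨c, rest, rfl⟩
  have h := amGo_inv (c :: rest).length (c :: rest) 1 0 (by omega) (by omega) (by simp)
    (fun t ht => by omega) (fun t ht1 ht2 => by rw [show t = 0 by omega])
  simpa [argmax, List.drop_succ_cons, List.getD_cons_zero] using h

lemma aPop_mem (l n i : Int) (c : Char) :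
    ∀ (st : List Char) (e : Char), e ∈ aPop l n i c st → e ∈ st := by
  intro st
  induction st with
  | nil => intro e he; simpa [aPop] using he
  | cons t s ih =>
      intro e he
      rw [aPop] at he
      split at he
      · exact List.mem_cons_of_mem _ (ih e he)
      · exact he

lemma aLoop_mem (l n : Int) (p : Char → Prop) :
    ∀ (u : List Char) (i : Int) (st : List Char),
      (∀ e ∈ st, p e) → (∀ e ∈ u, p e) → ∀ e ∈ aLoop l n u i st, p e := by
  intro u
  induction u with
  | nil => intro i st hst _ e he; exact hst e (by simpa [aLoop] using he)
  | cons c rest ih =>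
      intro i st hst hu e he
      rw [aLoop] at he
      refine ih (i + 1) _ ?_ (fun e' he' => hu e' (List.mem_cons_of_mem _ he')) e he
      intro e' he'
      split at he'
      · rcases List.mem_cons.mp he' with h | h
        · subst h; exact hu e' List.mem_cons_self
        · exact hst e' (aPop_mem l n i c st e' h)
      · exact hst e' (aPop_mem l n i c st e' he')

lemma aLoop_zero (l n : Int) (hl : l ≤ 0) :
    ∀ (rest : List Char) (i : Int), aLoop l n rest i [] = [] := by
  intro rest
  induction rest with
  | nil => intro i; rfl
  | cons c r ih =>
      intro i
      rw [aLoop]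
      simp only [aPop]
      rw [if_neg (by simp; omega)]
      exact ih (i + 1)

lemma aLoop_split (l n : Int) :
    ∀ (xs ys : List Char) (i : Int) (st : List Char),
      aLoop l n (xs ++ ys) i st = aLoop l n ys (i + (xs.length : Int)) (aLoop l n xs i st) := by
  intro xs
  induction xs with
  | nil => intro ys i st; simp [aLoop]
  | cons x xs ih =>
      intro ys i st
      rw [List.cons_append, aLoop, aLoop, ih]
      congr 1
      simp only [List.length_cons]
      push_cast
      ring

lemma aPop_empty (l n i : Int) (c : Char) :
    ∀ (st : List Char), 1 + (n - i) > l → (∀ e ∈ st, e < c) → aPop l n i c st = [] := by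
  intro st
  induction st with
  | nil => intro _ _; rfl
  | cons t s ih =>
      intro h hm
      rw [aPop, if_pos ⟨hm t List.mem_cons_self, by omega⟩]
      exact ih h (fun e he => hm e (List.mem_cons_of_mem _ he))

lemma aPop_append (l n i : Int) (c m : Char) (hc : c ≤ m ∨ n - i < l) :
    ∀ (st : List Char), aPop l n i c (st ++ [m]) = aPop (l - 1) n i c st ++ [m] := by
  intro st
  induction st with
  | nil =>
      simp only [List.nil_append, aPop]
      rw [if_neg]
      rcases hc with h | h
      · exact fun hh => absurd hh.1 (not_lt.mpr h)
      · rintro ⟨-, h2⟩; simp only [List.length_nil, Nat.cast_zero] at h2; omega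
  | cons t s ih =>
      simp only [List.cons_append, aPop, List.length_append, List.length_cons, List.length_nil]
      by_cases hcond : t < c ∧ ((s.length : Int) + 1 + (n - i) > l - 1)
      · rw [if_pos ⟨hcond.1, by push_cast; omega⟩, if_pos hcond]
        exact ih
      · rw [if_neg, if_neg hcond]
        · simp
        · intro hh
          exact hcond ⟨hh.1, by push_cast at hh; omega⟩

lemma aLoop_append (l n : Int) (m : Char) :
    ∀ (v : List Char) (i : Int) (st : List Char),
      (∀ t : Nat, t < v.length → v.getD t default ≤ m ∨ n - (i + (t : Int)) < l) →
      aLoop l n v i (st ++ [m]) = aLoop (l - 1) n v i st ++ [m] := by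
  intro v
  induction v with
  | nil => intro i st _; rfl
  | cons c v ih =>
      intro i st hb
      have hc : c ≤ m ∨ n - i < l := by
        have := hb 0 (by simp)
        simpa using this
      rw [aLoop, aLoop, aPop_append l n i c m hc st]
      have hlen : (((aPop (l - 1) n i c st ++ [m]).length : Int) < l) ↔
          (((aPop (l - 1) n i c st).length : Int) < l - 1) := by
        simp only [List.length_append, List.length_cons, List.length_nil]
        push_cast; omega
      have hstep : (if ((aPop (l - 1) n i c st ++ [m]).length : Int) < l then
            c :: (aPop (l - 1) n i c st ++ [m]) else aPop (l - 1) n i c st ++ [m]) =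
          (if ((aPop (l - 1) n i c st).length : Int) < l - 1 then
            c :: aPop (l - 1) n i c st else aPop (l - 1) n i c st) ++ [m] := by
        by_cases h : ((aPop (l - 1) n i c st).length : Int) < l - 1
        · rw [if_pos (hlen.mpr h), if_pos h]; simp
        · rw [if_neg (fun hh => h (hlen.mp hh)), if_neg h]
      rw [hstep]
      refine ih (i + 1) _ (fun t ht => ?_)
      have := hb (t + 1) (by simpa using Nat.succ_lt_succ ht)
      simp only [List.getD_cons_succ] at this
      rcases this with h | h
      · exact Or.inl h
      · right; push_cast at h ⊢; omega

lemma aPop_shift (l : Int) (c : Char) :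
    ∀ (st : List Char) (n i n' i' : Int), n - i = n' - i' →
      aPop l n i c st = aPop l n' i' c st := by
  intro st
  induction st with
  | nil => intro _ _ _ _ _; rfl
  | cons t s ih =>
      intro n i n' i' h
      rw [aPop, aPop, ih n i n' i' h]
      congr 1
      rw [h]

lemma aLoop_shift (l : Int) :
    ∀ (v : List Char) (n i n' i' : Int) (st : List Char), n - i = n' - i' →
      aLoop l n v i st = aLoop l n' v i' st := by
  intro v
  induction v with
  | nil => intro _ _ _ _ _ _; rfl
  | cons c v ih =>
      intro n i n' i' st h
      rw [aLoop, aLoop, aPop_shift l c st n i n' i' h]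
      exact ih n (i + 1) n' (i' + 1) _ (by omega)

lemma main_lemma : ∀ (N : Nat) (s : List Char), s.length ≤ N → ∀ (l : Int),
    (aLoop l (s.length : Int) s 0 []).reverse = bPick s (min l (s.length : Int)).toNat := by
  intro N
  induction N with
  | zero =>
      intro s hs l
      have : s = [] := List.length_eq_zero_iff.mp (by omega)
      subst this
      have h0 : (min l ((List.length ([] : List Char) : Nat) : Int)).toNat = 0 := by
        simp only [List.length_nil, Nat.cast_zero]; omega
      rw [h0]
      rfl
  | succ N ih =>
      intro s hs l
      set n : Nat := s.length with hn
      by_cases hk0 : (min l (n : Int)).toNat = 0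
      · rw [hk0, bPick]
        rcases Nat.eq_zero_or_pos n with hn0 | hnpos
        · have : s = [] := List.length_eq_zero_iff.mp hn0
          subst this; rfl
        · have hl0 : l ≤ 0 := by omega
          rw [aLoop_zero l (n : Int) hl0 s 0]
          rfl
      · obtain ⟨k', hk⟩ : ∃ k', (min l (n : Int)).toNat = k' + 1 :=
          ⟨(min l (n : Int)).toNat - 1, by omega⟩
        set k : Nat := k' + 1 with hkdef
        have hkInt : (k : Int) = min l (n : Int) := by omega
        have hkn : k ≤ n := by omega
        have hkl : (k : Int) ≤ l := by omega
        have hl1 : 1 ≤ l := by omega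
        set w : List Char := s.take (n - k + 1) with hw
        have hwlen : w.length = n - k + 1 := by
          rw [hw, List.length_take]; omega
        have hwne : w ≠ [] := by
          intro h; rw [h] at hwlen; simp at hwlen
        obtain ⟨hj1, hj2, hj3⟩ := argmax_good w hwne
        set j : Nat := argmax w with hj
        have hjnk : j ≤ n - k := by omega
        have hjn : j < n := by omega
        set m : Char := s.getD j default with hm
        have hmw : w.getD j default = m := getD_take s (n - k + 1) j hj1
        -- if l > n then k = n and j = 0
        have hln_j : (n : Int) < l → j = 0 := by
          intro hgt
          have : k = n := by omega
          omega
        -- decompose s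
        have hsplit : s = s.take j ++ (m :: s.drop (j + 1)) := by
          conv_lhs => rw [← List.take_append_drop j s]
          congr 1
          rw [List.drop_eq_getElem_cons hjn]
          congr 1
          rw [hm, List.getD_eq_getElem _ _ hjn]
        -- run A on the decomposition
        set st1 : List Char := aLoop l (n : Int) (s.take j) 0 [] with hst1
        have htlen : (s.take j).length = j := by rw [List.length_take]; omega
        have hrun : aLoop l (n : Int) s 0 [] =
            aLoop l (n : Int) (m :: s.drop (j + 1)) (j : Int) st1 := by
          conv_lhs => rw [hsplit]
          rw [aLoop_split, htlen, show (0:Int) + ((j:Nat) : Int) = ((j:Nat) : Int) by ring]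
        -- every element of st1 is < m
        have hst1lt : ∀ e ∈ st1, e < m := by
          refine aLoop_mem l (n : Int) (· < m) (s.take j) 0 [] (by simp) ?_
          intro e he
          obtain ⟨t, ht, hte⟩ := List.getElem_of_mem he
          rw [htlen] at ht
          have ht1 : t < w.length := by omega
          have : w.getD t default = e := by
            rw [getD_take s (n - k + 1) t ht1, List.getD_eq_getElem _ _ (by omega)]
            rw [← hte, List.getElem_take]
          rw [← this, ← hmw]
          exact hj2 t (by
            by_contra hcon
            have hjt : j ≤ t := by omega
            have := hj3 t ht1
            -- t < j must hold since elements before j are strictly smaller; here t < j directly: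
            omega)
        -- the pop at index j empties the stack
        have hpop : aPop l (n : Int) (j : Int) m st1 = [] := by
          by_cases hcase : l ≤ (n : Int)
          · refine aPop_empty l (n : Int) (j : Int) m st1 (by push_cast; omega) hst1lt
          · have hj0 : j = 0 := hln_j (by omega)
            rw [hst1, hj0]
            simp [aLoop, aPop]
        have hstep : aLoop l (n : Int) (m :: s.drop (j + 1)) (j : Int) st1 =
            aLoop l (n : Int) (s.drop (j + 1)) ((j : Int) + 1) [m] := by
          rw [aLoop, hpop]
          norm_num
          rw [if_pos (by omega)]
        -- the bottom element m survives the rest of the run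
        set v : List Char := s.drop (j + 1) with hv
        have hvlen : v.length = n - (j + 1) := by rw [hv, List.length_drop]
        have hblock : ∀ t : Nat, t < v.length →
            v.getD t default ≤ m ∨ (n : Int) - (((j : Int) + 1) + (t : Int)) < l := by
          intro t ht
          by_cases hcase : j + 1 + t ≤ n - k
          · left
            have hlt : j + 1 + t < w.length := by omega
            have h1 : v.getD t default = w.getD (j + 1 + t) default := by
              rw [hv, getD_drop s (j + 1) t ht, getD_take s (n - k + 1) _ hlt]
            rw [h1, ← hmw]
            exact hj3 _ hlt
          · right; push_cast; omega
        have hmain : aLoop l (n : Int) v ((j : Int) + 1) ([] ++ [m]) =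
            aLoop (l - 1) (n : Int) v ((j : Int) + 1) [] ++ [m] :=
          aLoop_append l (n : Int) m v ((j : Int) + 1) [] hblock
        have hshift : aLoop (l - 1) (n : Int) v ((j : Int) + 1) [] =
            aLoop (l - 1) (v.length : Int) v 0 [] := by
          refine aLoop_shift (l - 1) v (n : Int) ((j : Int) + 1) (v.length : Int) 0 [] ?_
          rw [hvlen]; omega
        have hihv : (aLoop (l - 1) (v.length : Int) v 0 []).reverse =
            bPick v (min (l - 1) (v.length : Int)).toNat := ih v (by omega) (l - 1)
        have hminv : (min (l - 1) (v.length : Int)).toNat = k' := by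
          rw [hvlen]
          by_cases hcase : l ≤ (n : Int)
          · omega
          · have hj0 : j = 0 := hln_j (by omega)
            have : k = n := by omega
            omega
        -- assemble
        rw [hrun, hstep]
        have : aLoop l (n : Int) v ((j : Int) + 1) [m] =
            aLoop (l - 1) (n : Int) v ((j : Int) + 1) [] ++ [m] := by
          simpa using hmain
        rw [this]
        rw [List.reverse_append, List.reverse_cons, List.reverse_nil, List.nil_append,
          List.singleton_append, hshift, hihv, hminv]
        rw [hk, bPick]

-- ===== VERDICT (by name: the statement is the Claim_ definition above) =====
theorem get_largest_subsequence_spec : Claim_equal_get_largest_subsequence := by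
  intro seq l _
  unfold Spec_get_largest_subsequence get_largest_subsequence get_largest_subsequence_alt
  exact congrArg String.mk (main_lemma seq.toList.length seq.toList (le_refl _) l)
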